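-- pv_equiv track=rewrite | github.com/karpeevv-cyber/ozon-ads-local | backend/app/services/unit_economics.py | get_unit_econ_sheet_config
-- ===== SOURCE A (Python) =====
-- UNIT_ECON_SOURCES = [
--     {
--         "seller_client_ids": {"3813927"},
--         "company_aliases": {"Osome tea"},
--         "sheet_id": "17W18g8mCD2VxtNIOr8EaVM4Hik4cLI444HeFWx31-Ts",
--         "gid": "703239472",
--     },
--     {
--         "seller_client_ids": {"3319846"},
--         "company_aliases": {"Aura tea"},
--         "sheet_id": "1DdBm9Ul__fyUY0hWobwg1fTtIzmILif4ycV_1503R8g",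
--         "gid": "703239472",
--     },
-- ]
--
-- def _normalize_key(value: str | None) -> str:
--     return "".join(ch for ch in str(value or "").strip().lower() if ch.isalnum())
--
-- def get_unit_econ_sheet_config(company_name: str | None = None, seller_client_id: str | None = None) -> dict[str, str] | None:
--     seller_key = _normalize_key(seller_client_id)
--     company_key = _normalize_key(company_name)
--     for source in UNIT_ECON_SOURCES:
--         if seller_key and seller_key in {_normalize_key(v) for v in source.get("seller_client_ids", set())}:
--             return {"sheet_id": source["sheet_id"], "gid": source["gid"]}
--     for source in UNIT_ECON_SOURCES:
--         if company_key and company_key in {_normalize_key(v) for v in source.get("company_aliases", set())}: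
--             return {"sheet_id": source["sheet_id"], "gid": source["gid"]}
--     return None
-- ===== SOURCE B (Python) =====
-- UNIT_ECON_SOURCES = [
--     {
--         "seller_client_ids": {"3813927"},
--         "company_aliases": {"Osome tea"},
--         "sheet_id": "17W18g8mCD2VxtNIOr8EaVM4Hik4cLI444HeFWx31-Ts",
--         "gid": "703239472",
--     },
--     {
--         "seller_client_ids": {"3319846"},
--         "company_aliases": {"Aura tea"},
--         "sheet_id": "1DdBm9Ul__fyUY0hWobwg1fTtIzmILif4ycV_1503R8g",
--         "gid": "703239472",
--     },
-- ]
--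
-- def _normalize_key(value):
--     return "".join(ch for ch in str(value or "").strip().lower() if ch.isalnum())
--
-- def _build_indexes():
--     seller_index = {}
--     company_index = {}
--     for source in UNIT_ECON_SOURCES:
--         cfg = {"sheet_id": source["sheet_id"], "gid": source["gid"]}
--         for sid in source.get("seller_client_ids", set()):
--             seller_index.setdefault(_normalize_key(sid), cfg)
--         for alias in source.get("company_aliases", set()):
--             company_index.setdefault(_normalize_key(alias), cfg)
--     return seller_index, company_index
--
-- _SELLER_INDEX, _COMPANY_INDEX = _build_indexes()
--
-- def get_unit_econ_sheet_config(company_name=None, seller_client_id=None):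
--     seller_key = _normalize_key(seller_client_id)
--     company_key = _normalize_key(company_name)
--     if seller_key and seller_key in _SELLER_INDEX:
--         return dict(_SELLER_INDEX[seller_key])
--     if company_key and company_key in _COMPANY_INDEX:
--         return dict(_COMPANY_INDEX[company_key])
--     return None
-- ===== Notes on version B (the rewrite author's own statement) =====
-- stated objective: idiomatic
-- what changed: B precomputes two normalized-key-to-config dict indexes once (setdefault, so the first source wins) and replaces A's two per-call scans over the sources with two direct dict lookups, seller key first.
import Mathlib
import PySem

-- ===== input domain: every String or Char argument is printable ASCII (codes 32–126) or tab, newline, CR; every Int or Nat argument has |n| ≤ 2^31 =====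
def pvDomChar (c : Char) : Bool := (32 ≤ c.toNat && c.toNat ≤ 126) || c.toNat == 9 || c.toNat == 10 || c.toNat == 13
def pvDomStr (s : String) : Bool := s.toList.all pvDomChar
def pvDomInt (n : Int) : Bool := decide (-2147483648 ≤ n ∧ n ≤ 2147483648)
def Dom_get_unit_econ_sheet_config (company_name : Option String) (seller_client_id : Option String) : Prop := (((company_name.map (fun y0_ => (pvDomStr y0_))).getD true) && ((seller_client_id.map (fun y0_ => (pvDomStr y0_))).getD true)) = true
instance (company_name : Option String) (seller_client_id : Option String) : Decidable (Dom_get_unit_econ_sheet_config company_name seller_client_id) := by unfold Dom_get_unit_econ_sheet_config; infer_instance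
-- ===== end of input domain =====

-- B builds two normalized-key dict indexes once (first source wins) and replaces A's two scans over the sources with two direct lookups; objective: idiomatic.


-- ===== PORT A =====
-- source = (seller_client_ids, company_aliases, sheet_id, gid); Python sets → PySem.Set
def pvSources : List (PySem.Set String × PySem.Set String × String × String) :=
  [ (PySem.Set.ofList ["3813927"], PySem.Set.ofList ["Osome tea"],
     "17W18g8mCD2VxtNIOr8EaVM4Hik4cLI444HeFWx31-Ts", "703239472"),
    (PySem.Set.ofList ["3319846"], PySem.Set.ofList ["Aura tea"],
     "1DdBm9Ul__fyUY0hWobwg1fTtIzmILif4ycV_1503R8g", "703239472") ]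

-- _normalize_key(value): "".join(ch for ch in str(value or "").strip().lower() if ch.isalnum()); keys kept as List Char
def pvNormKey (value : Option String) : List Char :=
  (PySem.Chars.lower (PySem.Chars.strip (value.getD "").toList)).filter PySem.Chars.isalnum

-- first 'for source in UNIT_ECON_SOURCES' loop of A (seller ids)
def pvFindSeller (sk : List Char) :
    List (PySem.Set String × PySem.Set String × String × String) → Option (List (String × String))
  | [] => none
  | (ids, _, sheet_id, gid) :: rest =>
    if !sk.isEmpty && PySem.Set.contains (PySem.Set.ofList (ids.map (fun v => pvNormKey (some v)))) sk
    then some [("sheet_id", sheet_id), ("gid", gid)]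
    else pvFindSeller sk rest

-- second 'for source in UNIT_ECON_SOURCES' loop of A (company aliases)
def pvFindCompany (ck : List Char) :
    List (PySem.Set String × PySem.Set String × String × String) → Option (List (String × String))
  | [] => none
  | (_, aliases, sheet_id, gid) :: rest =>
    if !ck.isEmpty && PySem.Set.contains (PySem.Set.ofList (aliases.map (fun v => pvNormKey (some v)))) ck
    then some [("sheet_id", sheet_id), ("gid", gid)]
    else pvFindCompany ck rest

def get_unit_econ_sheet_config (company_name : Option String) (seller_client_id : Option String) : Option (List (String × String)) :=
  let seller_key := pvNormKey seller_client_id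
  let company_key := pvNormKey company_name
  match pvFindSeller seller_key pvSources with
  | some r => some r
  | none => pvFindCompany company_key pvSources

-- ===== PORT B =====
-- _build_indexes(): one pass over the sources, setdefault so the first source wins
def pvIndexes : PySem.Dict (List Char) (List (String × String)) × PySem.Dict (List Char) (List (String × String)) :=
  pvSources.foldl
    (fun (acc : PySem.Dict (List Char) (List (String × String)) × PySem.Dict (List Char) (List (String × String)))
         (source : PySem.Set String × PySem.Set String × String × String) =>
      let cfg : List (String × String) := [("sheet_id", source.2.2.1), ("gid", source.2.2.2)]
      let si := source.1.foldl (fun d v => d.setdefault (pvNormKey (some v)) cfg) acc.1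
      let ci := source.2.1.foldl (fun d v => d.setdefault (pvNormKey (some v)) cfg) acc.2
      (si, ci))
    (PySem.Dict.empty, PySem.Dict.empty)

def get_unit_econ_sheet_config_alt (company_name : Option String) (seller_client_id : Option String) : Option (List (String × String)) :=
  let seller_key := pvNormKey seller_client_id
  let company_key := pvNormKey company_name
  match (if seller_key.isEmpty then none else pvIndexes.1.get? seller_key) with
  | some cfg => some cfg
  | none => if company_key.isEmpty then none else pvIndexes.2.get? company_key

-- ===== PRECONDITION & SPEC =====
def Spec_get_unit_econ_sheet_config (company_name : Option String) (seller_client_id : Option String) (out : Option (List (String × String))) : Prop := out = get_unit_econ_sheet_config_alt company_name seller_client_id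
instance (company_name : Option String) (seller_client_id : Option String) (out : Option (List (String × String))) : Decidable (Spec_get_unit_econ_sheet_config company_name seller_client_id out) := by unfold Spec_get_unit_econ_sheet_config; infer_instance

-- ===== CLAIM (what is proved, stated in full; the proofs are below) =====
def Claim_equal_get_unit_econ_sheet_config : Prop := ∀ (company_name : Option String) (seller_client_id : Option String), Dom_get_unit_econ_sheet_config company_name seller_client_id → Spec_get_unit_econ_sheet_config company_name seller_client_id (get_unit_econ_sheet_config company_name seller_client_id)

-- ===== LEMMAS AND PROOFS =====
set_option maxRecDepth 8192 in
lemma core_eq (sk ck : List Char) :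
    (match pvFindSeller sk pvSources with
     | some r => some r
     | none => pvFindCompany ck pvSources) =
    (match (if sk.isEmpty then none else pvIndexes.1.get? sk) with
     | some cfg => some cfg
     | none => if ck.isEmpty then none else pvIndexes.2.get? ck) := by
  have e1 : PySem.Set.ofList (((PySem.Set.ofList ["3813927"]) : PySem.Set String).map (fun v => pvNormKey (some v))) = ["3813927".toList] := by decide
  have e2 : PySem.Set.ofList (((PySem.Set.ofList ["3319846"]) : PySem.Set String).map (fun v => pvNormKey (some v))) = ["3319846".toList] := by decide
  have e3 : PySem.Set.ofList (((PySem.Set.ofList ["Osome tea"]) : PySem.Set String).map (fun v => pvNormKey (some v))) = ["osometea".toList] := by decide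
  have e4 : PySem.Set.ofList (((PySem.Set.ofList ["Aura tea"]) : PySem.Set String).map (fun v => pvNormKey (some v))) = ["auratea".toList] := by decide
  have eI : pvIndexes = (PySem.Dict.mk [("3813927".toList, [("sheet_id", "17W18g8mCD2VxtNIOr8EaVM4Hik4cLI444HeFWx31-Ts"), ("gid", "703239472")]), ("3319846".toList, [("sheet_id", "1DdBm9Ul__fyUY0hWobwg1fTtIzmILif4ycV_1503R8g"), ("gid", "703239472")])],
                        PySem.Dict.mk [("osometea".toList, [("sheet_id", "17W18g8mCD2VxtNIOr8EaVM4Hik4cLI444HeFWx31-Ts"), ("gid", "703239472")]), ("auratea".toList, [("sheet_id", "1DdBm9Ul__fyUY0hWobwg1fTtIzmILif4ycV_1503R8g"), ("gid", "703239472")])]) := by decide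
  rw [eI]
  simp only [pvFindSeller, pvFindCompany, pvSources, e1, e2, e3, e4,
    PySem.Dict.get?_mk_cons, PySem.Set.contains]
  by_cases h1 : sk = ['3','8','1','3','9','2','7'] <;> by_cases h2 : sk = ['3','3','1','9','8','4','6'] <;>
  by_cases h3 : ck = ['o','s','o','m','e','t','e','a'] <;> by_cases h4 : ck = ['a','u','r','a','t','e','a'] <;>
  (try simp [h1, h2, h3, h4, List.isEmpty_iff]) <;>
  simp [Ne.symm h1, Ne.symm h2, PySem.Dict.get?] <;> simp [Ne.symm h3, Ne.symm h4]

-- ===== VERDICT (by name: the statement is the Claim_ definition above) =====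
theorem get_unit_econ_sheet_config_spec : Claim_equal_get_unit_econ_sheet_config := by
  intro company_name seller_client_id _
  unfold Spec_get_unit_econ_sheet_config get_unit_econ_sheet_config get_unit_econ_sheet_config_alt
  exact core_eq (pvNormKey seller_client_id) (pvNormKey company_name)
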